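-- pv_equiv track=rewrite | github.com/CEHI-code-repos/TheRateStabilizingTool | fetch_data.py | construct_age
-- ===== SOURCE A (Python) =====
-- def push_element(vector):
--     return[vector[0], vector[1:]]
--
-- def construct_age(ageV, noteV, age_structure):
--     i = 0
--     temp = 0
--     structed_age = []
--     actstruct = []
--     first_record = True # to skip header
--     while ageV != []: # push the element out when age vector is not empty
--         [cnt, ageV] = push_element(ageV)
--         [exp, noteV] = push_element(noteV)
--         if(i == len(age_structure) or i == len(age_structure) - 1): # deal with the outflow issue when on the last age structure
--             if(age_structure[i] < 0):
--                 break
--             temp += int(cnt)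
--         elif (exp >= age_structure[i]):
--             if first_record:
--                 actstruct.append(exp)
--                 first_record = False
--             if exp < abs(age_structure[i+1]):
--                 temp += int(cnt)
--             else:
--                 if(age_structure[i+1] > 0):
--                     actstruct.append(exp)
--                     structed_age.append(temp)
--                     i += 1
--                     temp = int(cnt)
--     if(age_structure[i] > 0): # to get rid of the impact of cap age (using negative number)
--         structed_age.append(temp)
--     return [structed_age, actstruct]
-- ===== SOURCE B (Python) =====
-- def construct_age(ageV, noteV, age_structure):
--     S = age_structure
--     counts, acts = [], []
--     i, temp = 0, 0
--     for cnt, exp in zip(ageV, noteV):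
--         if i == len(S) - 1:
--             if S[i] < 0:           # cap group reached: remaining records are ignored
--                 return [counts, acts]
--             temp += cnt
--         elif exp < S[i]:
--             pass                   # record below the current group's lower bound: skipped
--         else:
--             if not acts:
--                 acts.append(exp)
--             nxt = S[i + 1]
--             if exp < abs(nxt):
--                 temp += cnt
--             elif nxt > 0:
--                 acts.append(exp)
--                 counts.append(temp)
--                 i += 1
--                 temp = cnt
--     if S[i] > 0:
--         counts.append(temp)
--     return [counts, acts]
-- ===== Notes on version B (the rewrite author's own statement) =====
-- stated objective: faster
-- what changed: B makes one O(n) pass over zip(ageV, noteV) instead of A's push_element, which re-slices (copies) both lists on every iteration, and replaces the first_record flag by an emptiness test on the actstruct accumulator.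
-- outside the precondition, e.g. on construct_age([1, 2], [5], [-1]): A returns [[], []], B returns [[], []]
import Mathlib
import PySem

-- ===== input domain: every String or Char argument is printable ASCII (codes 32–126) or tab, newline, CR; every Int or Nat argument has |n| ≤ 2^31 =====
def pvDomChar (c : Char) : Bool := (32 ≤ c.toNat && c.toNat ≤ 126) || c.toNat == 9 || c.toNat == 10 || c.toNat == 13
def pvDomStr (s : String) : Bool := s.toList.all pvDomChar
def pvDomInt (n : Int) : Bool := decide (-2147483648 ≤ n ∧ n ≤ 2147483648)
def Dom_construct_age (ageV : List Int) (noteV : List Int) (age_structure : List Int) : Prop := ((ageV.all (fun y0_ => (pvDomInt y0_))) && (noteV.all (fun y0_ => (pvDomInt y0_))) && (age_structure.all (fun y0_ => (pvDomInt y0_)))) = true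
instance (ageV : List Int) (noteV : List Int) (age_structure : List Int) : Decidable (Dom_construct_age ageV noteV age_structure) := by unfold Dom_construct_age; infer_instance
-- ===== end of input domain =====

-- B replaces A's repeated list slicing (push_element copies the tail every iteration, O(n^2))
-- by one pass over the zipped records, and the first_record flag by an emptiness test: faster (asymptotic).

-- ===== PORT A =====
-- A's while loop pops heads via push_element: on a nonempty vector, vector[0] is the head and
-- vector[1:] is the tail, so the loop is structural recursion on ageV; an empty vector means
-- push_element raises IndexError (outside Pre_), modelled by returning the current state.
-- age_structure[...] is ported as (pyGet? …).getD 0: inside Pre_ the invariant 0 ≤ i ≤ len-1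
-- keeps every index in range, so the default is never read (outside Pre_ nothing is claimed).
def construct_age_go (S : List Int) : List Int → List Int → Int → Int → List Int → List Int → Bool → Int × Int × List Int × List Int
  | [], _, i, temp, structed, act, _ => (i, temp, structed, act)          -- while condition false
  | _ :: _, [], i, temp, structed, act, _ => (i, temp, structed, act)     -- push_element(noteV) raises (outside Pre_)
  | cnt :: ageRest, exp :: noteRest, i, temp, structed, act, first =>
    if i = (S.length : Int) ∨ i = (S.length : Int) - 1 then
      if (PySem.List.pyGet? S i).getD 0 < 0 then (i, temp, structed, act) -- break
      else construct_age_go S ageRest noteRest i (temp + cnt) structed act first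
    else if (PySem.List.pyGet? S i).getD 0 ≤ exp then
      let act2 := if first then act ++ [exp] else act
      let first2 := if first then false else first
      if exp < |(PySem.List.pyGet? S (i + 1)).getD 0| then
        construct_age_go S ageRest noteRest i (temp + cnt) structed act2 first2
      else if 0 < (PySem.List.pyGet? S (i + 1)).getD 0 then
        construct_age_go S ageRest noteRest (i + 1) cnt (structed ++ [temp]) (act2 ++ [exp]) first2
      else
        construct_age_go S ageRest noteRest i temp structed act2 first2
    else
      construct_age_go S ageRest noteRest i temp structed act first

def construct_age (ageV : List Int) (noteV : List Int) (age_structure : List Int) : List (List Int) :=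
  let r := construct_age_go age_structure ageV noteV 0 0 [] [] true
  if 0 < (PySem.List.pyGet? age_structure r.1).getD 0 then
    [r.2.2.1 ++ [r.2.1], r.2.2.2]
  else
    [r.2.2.1, r.2.2.2]

-- ===== PORT B =====
-- Source B's for-loop over zip(ageV, noteV); the early `return [counts, acts]` at the cap returns
-- directly; indexing into S ported as in port A (in range inside Pre_).
def construct_age_alt_go (S : List Int) (n : Int) : List (Int × Int) → Int → Int → List Int → List Int → List (List Int)
  | [], i, temp, counts, acts =>
      if 0 < (PySem.List.pyGet? S i).getD 0 then [counts ++ [temp], acts] else [counts, acts]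
  | (cnt, exp) :: rest, i, temp, counts, acts =>
      if i = n - 1 then
        if (PySem.List.pyGet? S i).getD 0 < 0 then [counts, acts]         -- cap reached: return
        else construct_age_alt_go S n rest i (temp + cnt) counts acts
      else if exp < (PySem.List.pyGet? S i).getD 0 then
        construct_age_alt_go S n rest i temp counts acts                  -- record skipped
      else
        let acts1 := if acts.isEmpty then acts ++ [exp] else acts
        let nxt := (PySem.List.pyGet? S (i + 1)).getD 0
        if exp < |nxt| then
          construct_age_alt_go S n rest i (temp + cnt) counts acts1
        else if 0 < nxt then
          construct_age_alt_go S n rest (i + 1) cnt (counts ++ [temp]) (acts1 ++ [exp])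
        else
          construct_age_alt_go S n rest i temp counts acts1

def construct_age_alt (ageV : List Int) (noteV : List Int) (age_structure : List Int) : List (List Int) :=
  construct_age_alt_go age_structure (age_structure.length : Int) (ageV.zip noteV) 0 0 [] []

-- ===== PRECONDITION & SPEC =====
-- Pre_ excludes empty age_structure (A's final age_structure[i] raises IndexError) and ageV longer
-- than noteV (push_element(noteV) raises IndexError, except when the negative cap breaks the loop
-- first, where A returns and B happens to agree).
def Pre_construct_age (ageV : List Int) (noteV : List Int) (age_structure : List Int) : Prop :=
  age_structure ≠ [] ∧ ageV.length ≤ noteV.length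
instance (ageV : List Int) (noteV : List Int) (age_structure : List Int) : Decidable (Pre_construct_age ageV noteV age_structure) := by unfold Pre_construct_age; infer_instance

def pvWitness_construct_age : List Int × List Int × List Int := ([1, 1], [10, 20], [10, 20, 30])

def Spec_construct_age (ageV : List Int) (noteV : List Int) (age_structure : List Int) (out : List (List Int)) : Prop := out = construct_age_alt ageV noteV age_structure
instance (ageV : List Int) (noteV : List Int) (age_structure : List Int) (out : List (List Int)) : Decidable (Spec_construct_age ageV noteV age_structure out) := by unfold Spec_construct_age; infer_instance

-- ===== CLAIM (what is proved, stated in full; the proofs are below) =====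
def Claim_equal_construct_age : Prop := ∀ (ageV : List Int) (noteV : List Int) (age_structure : List Int), Dom_construct_age ageV noteV age_structure → Pre_construct_age ageV noteV age_structure → Spec_construct_age ageV noteV age_structure (construct_age ageV noteV age_structure)

-- ===== LEMMAS AND PROOFS =====

lemma go_eq (S : List Int) :
    ∀ (ageV noteV : List Int) (i temp : Int) (st act : List Int) (first : Bool),
      ageV.length ≤ noteV.length →
      0 ≤ i → i ≤ (S.length : Int) - 1 →
      (first = true ↔ act = []) →
      (let r := construct_age_go S ageV noteV i temp st act first
       if 0 < (PySem.List.pyGet? S r.1).getD 0 then [r.2.2.1 ++ [r.2.1], r.2.2.2]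
       else [r.2.2.1, r.2.2.2])
      = construct_age_alt_go S (S.length : Int) (ageV.zip noteV) i temp st act := by
  intro ageV
  induction ageV with
  | nil =>
      intro noteV i temp st act first _ _ _ _
      simp [construct_age_go, construct_age_alt_go]
  | cons cnt ageRest ih =>
      intro noteV i temp st act first hlen hi0 hin hfa
      match noteV with
      | [] => simp at hlen
      | exp :: noteRest =>
        have hlen' : ageRest.length ≤ noteRest.length := by simpa using hlen
        have hnen : ¬ i = (S.length : Int) := by omega
        by_cases hlast : i = (S.length : Int) - 1
        · subst hlast
          by_cases hneg : (PySem.List.pyGet? S ((S.length : Int) - 1)).getD 0 < 0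
          · have h0 : ¬ 0 < (PySem.List.pyGet? S ((S.length : Int) - 1)).getD 0 := by omega
            simp [construct_age_go, construct_age_alt_go, hneg, h0]
          · simpa [construct_age_go, construct_age_alt_go, hneg] using
              ih noteRest ((S.length : Int) - 1) (temp + cnt) st act first hlen' hi0 hin hfa
        · by_cases hskip : exp < (PySem.List.pyGet? S i).getD 0
          · have hge : ¬ (PySem.List.pyGet? S i).getD 0 ≤ exp := by omega
            simpa [construct_age_go, construct_age_alt_go, hlast, hnen, hskip, hge] using
              ih noteRest i temp st act first hlen' hi0 hin hfa
          · have hge : (PySem.List.pyGet? S i).getD 0 ≤ exp := by omega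
            cases first with
            | true =>
              have ha : act = [] := hfa.mp rfl
              subst ha
              by_cases hlt : exp < |(PySem.List.pyGet? S (i + 1)).getD 0|
              · simpa [construct_age_go, construct_age_alt_go, hlast, hnen, hge, hskip, hlt] using
                  ih noteRest i (temp + cnt) st [exp] false hlen' hi0 hin (by simp)
              · by_cases hpos : 0 < (PySem.List.pyGet? S (i + 1)).getD 0
                · simpa [construct_age_go, construct_age_alt_go, hlast, hnen, hge, hskip, hlt, hpos] using
                    ih noteRest (i + 1) cnt (st ++ [temp]) [exp, exp] false hlen'
                      (by omega) (by omega) (by simp)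
                · simpa [construct_age_go, construct_age_alt_go, hlast, hnen, hge, hskip, hlt, hpos] using
                    ih noteRest i temp st [exp] false hlen' hi0 hin (by simp)
            | false =>
              have ha : act ≠ [] := fun h => absurd (hfa.mpr h) (by simp)
              have hie : act.isEmpty = false := by simp [ha]
              by_cases hlt : exp < |(PySem.List.pyGet? S (i + 1)).getD 0|
              · simpa [construct_age_go, construct_age_alt_go, hlast, hnen, hge, hskip, hlt, hie] using
                  ih noteRest i (temp + cnt) st act false hlen' hi0 hin (by simp [ha])
              · by_cases hpos : 0 < (PySem.List.pyGet? S (i + 1)).getD 0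
                · simpa [construct_age_go, construct_age_alt_go, hlast, hnen, hge, hskip, hlt, hpos, hie] using
                    ih noteRest (i + 1) cnt (st ++ [temp]) (act ++ [exp]) false hlen'
                      (by omega) (by omega) (by simp)
                · simpa [construct_age_go, construct_age_alt_go, hlast, hnen, hge, hskip, hlt, hpos, hie] using
                    ih noteRest i temp st act false hlen' hi0 hin (by simp [ha])

-- ===== VERDICT (by name: the statement is the Claim_ definition above) =====
theorem construct_age_spec : Claim_equal_construct_age := by
  intro ageV noteV S _ hpre
  obtain ⟨hS, hlen⟩ := hpre
  have hS1 : 1 ≤ (S.length : Int) := by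
    have : 0 < S.length := List.length_pos_of_ne_nil hS
    exact_mod_cast this
  unfold Spec_construct_age construct_age construct_age_alt
  exact go_eq S ageV noteV 0 0 [] [] true hlen (by omega) (by omega) (by simp)
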